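-- pv_equiv track=rewrite | github.com/fjoelnr/anr-cli | anr/template.py | render_context_index
-- ===== SOURCE A (Python) =====
-- def render_context_index(detected_dirs: list[str]) -> str:
--     source_dirs = [name for name in detected_dirs if name in {"src", "app", "backend", "frontend", "lib", "scripts"}]
--     test_dirs = [name for name in detected_dirs if name == "tests"]
--     docs_dirs = [name for name in detected_dirs if name == "docs"]
--
--     def section_lines(title: str, entries: list[str]) -> list[str]:
--         lines = [f"{title}:"]
--         if entries:
--             lines.extend([f"* {entry}" for entry in entries])
--         else:
--             lines.append("* none")
--         lines.append("")
--         return lines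
--
--     lines = [
--         "# Repository Context Index",
--         "",
--         "Repository structure:",
--         "",
--     ]
--     lines.extend(section_lines("Source", source_dirs))
--     lines.extend(section_lines("Tests", test_dirs))
--     lines.extend(section_lines("Documentation", docs_dirs))
--     lines.append("ANR migration generated this file.")
--     return "\n".join(lines) + "\n"
-- ===== SOURCE B (Python) =====
-- def render_context_index(detected_dirs: list[str]) -> str:
--     SOURCE_NAMES = {"src", "app", "backend", "frontend", "lib", "scripts"}
--     buckets = {"Source": [], "Tests": [], "Documentation": []}
--     for name in detected_dirs:
--         if name in SOURCE_NAMES: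
--             buckets["Source"].append(name)
--         elif name == "tests":
--             buckets["Tests"].append(name)
--         elif name == "docs":
--             buckets["Documentation"].append(name)
--     out = [
--         "# Repository Context Index",
--         "",
--         "Repository structure:",
--         "",
--     ]
--     for title, entries in buckets.items():
--         out.append(title + ":")
--         out.extend("* " + entry for entry in (entries or ["none"]))
--         out.append("")
--     out.append("ANR migration generated this file.")
--     return "\n".join(out) + "\n"
-- ===== Notes on version B (the rewrite author's own statement) =====
-- stated objective: alternative
-- what changed: Replaces the three separate filtering comprehensions over detected_dirs with one dispatching pass that buckets each name into Source/Tests/Documentation, then assembles the sections by iterating over the bucket dict instead of three explicit section_lines calls.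
import Mathlib
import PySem

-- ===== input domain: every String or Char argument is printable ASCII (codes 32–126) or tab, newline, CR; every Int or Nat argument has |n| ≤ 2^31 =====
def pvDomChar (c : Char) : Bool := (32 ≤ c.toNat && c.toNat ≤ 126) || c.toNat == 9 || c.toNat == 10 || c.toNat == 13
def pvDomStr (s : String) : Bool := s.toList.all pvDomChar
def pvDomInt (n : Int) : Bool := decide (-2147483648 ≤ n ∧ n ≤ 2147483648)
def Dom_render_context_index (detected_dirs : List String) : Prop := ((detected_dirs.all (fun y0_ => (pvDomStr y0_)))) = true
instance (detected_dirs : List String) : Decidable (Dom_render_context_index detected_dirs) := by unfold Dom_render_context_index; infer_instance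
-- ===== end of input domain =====

-- B replaces A's three filtering comprehensions by one dispatching pass over detected_dirs
-- plus a loop over the three (title, bucket) sections (objective: alternative decomposition).

-- ===== PORT A =====
-- Python's set literal {"src", ...}; membership test ported as list membership on the distinct elements.
def pvSourceSet : List String := ["src", "app", "backend", "frontend", "lib", "scripts"]

-- section_lines helper of A, literally
def pvSectionLines (title : String) (entries : List String) : List String :=
  let lines := [title ++ ":"]
  let lines := if entries.isEmpty = false then
      lines ++ entries.map (fun entry => "* " ++ entry)
    else
      lines ++ ["* none"]
  lines ++ [""]

def render_context_index (detected_dirs : List String) : String :=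
  let source_dirs := detected_dirs.filter (fun name => pvSourceSet.contains name)
  let test_dirs := detected_dirs.filter (fun name => name == "tests")
  let docs_dirs := detected_dirs.filter (fun name => name == "docs")
  let lines := ["# Repository Context Index", "", "Repository structure:", ""]
  let lines := lines ++ pvSectionLines "Source" source_dirs
  let lines := lines ++ pvSectionLines "Tests" test_dirs
  let lines := lines ++ pvSectionLines "Documentation" docs_dirs
  let lines := lines ++ ["ANR migration generated this file."]
  PySem.Str.join "\n" lines ++ "\n"

-- ===== PORT B =====
-- one dispatching pass: each name goes to exactly one of the three buckets (or is skipped)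
def pvDispatch : List String → List String × List String × List String
  | [] => ([], [], [])
  | name :: rest =>
    let (s, t, d) := pvDispatch rest
    if pvSourceSet.contains name then (name :: s, t, d)
    else if name == "tests" then (s, name :: t, d)
    else if name == "docs" then (s, t, name :: d)
    else (s, t, d)

def render_context_index_alt (detected_dirs : List String) : String :=
  let (s, t, d) := pvDispatch detected_dirs
  let out := ["# Repository Context Index", "", "Repository structure:", ""]
  let out := [("Source", s), ("Tests", t), ("Documentation", d)].foldl
    (fun acc (sec : String × List String) =>
      (acc ++ [sec.1 ++ ":"])
        ++ (if sec.2.isEmpty then ["none"] else sec.2).map (fun entry => "* " ++ entry)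
        ++ [""])
    out
  PySem.Str.join "\n" (out ++ ["ANR migration generated this file."]) ++ "\n"

-- ===== PRECONDITION & SPEC =====
def Spec_render_context_index (detected_dirs : List String) (out : String) : Prop := out = render_context_index_alt detected_dirs
instance (detected_dirs : List String) (out : String) : Decidable (Spec_render_context_index detected_dirs out) := by unfold Spec_render_context_index; infer_instance

-- ===== CLAIM (what is proved, stated in full; the proofs are below) =====
def Claim_equal_render_context_index : Prop := ∀ (detected_dirs : List String), Dom_render_context_index detected_dirs → Spec_render_context_index detected_dirs (render_context_index detected_dirs)

-- ===== LEMMAS AND PROOFS =====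

-- the single dispatching pass produces exactly A's three filtered lists
theorem pvDispatch_eq_filters (dd : List String) :
    pvDispatch dd =
      (dd.filter (fun name => pvSourceSet.contains name),
       dd.filter (fun name => name == "tests"),
       dd.filter (fun name => name == "docs")) := by
  induction dd with
  | nil => rfl
  | cons name rest ih =>
    by_cases hs : pvSourceSet.contains name = true
    · have h1 : (name == "tests") = false := by
        simp only [pvSourceSet, List.contains_eq_mem, List.mem_cons, decide_eq_true_eq] at hs
        rcases hs with h | h | h | h | h | h | h <;> simp_all
      have h2 : (name == "docs") = false := by
        simp only [pvSourceSet, List.contains_eq_mem, List.mem_cons, decide_eq_true_eq] at hs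
        rcases hs with h | h | h | h | h | h | h <;> simp_all
      simp only [List.contains_eq_mem, decide_eq_true_eq] at hs
      simp [pvDispatch, ih, List.filter, hs, h1, h2]
    · simp only [List.contains_eq_mem, decide_eq_true_eq] at hs
      by_cases ht : (name == "tests") = true
      · have hd0 : (name == "docs") = false := by simp_all
        simp [pvDispatch, ih, List.filter, hs, ht, hd0]
      · by_cases hd : (name == "docs") = true
        · simp [pvDispatch, ih, List.filter, hs, ht, hd]
        · simp [pvDispatch, ih, List.filter, hs, ht, hd]

-- B's "(entries or ['none']) mapped" equals A's "mapped entries or ['* none']"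
theorem pvMap_or_none (e : List String) :
    (if e.isEmpty then ["none"] else e).map (fun entry => "* " ++ entry) =
      if e.isEmpty = false then e.map (fun entry => "* " ++ entry) else ["* none"] := by
  cases e <;> simp

-- ===== VERDICT (by name: the statement is the Claim_ definition above) =====
theorem render_context_index_spec : Claim_equal_render_context_index := by
  intro dd _
  unfold Spec_render_context_index render_context_index render_context_index_alt
  rw [pvDispatch_eq_filters]
  simp only [List.foldl, pvSectionLines, pvMap_or_none]
  split <;> split <;> split <;> simp
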